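-- pv_equiv track=rewrite | github.com/Milovan-Crowley/Consilium | runtimes/scripts/check-runtime-parity.py | check_manifest
-- ===== SOURCE A (Python) =====
-- def check_manifest(manifest: dict) -> list[str]:
--     names = [agent["name"] for agent in manifest["agents"]]
--     errors = []
--     if len(names) != len(set(names)):
--         seen = set()
--         dupes = sorted({name for name in names if name in seen or seen.add(name)})
--         errors.append(f"source/manifest.json: duplicate agent names: {', '.join(dupes)}")
--     if "consilium-speculator-primus" not in names:
--         errors.append("source/manifest.json: missing consilium-speculator-primus")
--     return errors
-- ===== SOURCE B (Python) =====
-- def check_manifest(manifest: dict) -> list[str]: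
--     # One counting pass over the agents: a frequency table replaces A's
--     # names list + set-length guard + seen-set duplicate scan.
--     counts = {}
--     for agent in manifest["agents"]:
--         name = agent["name"]
--         counts[name] = counts.get(name, 0) + 1
--     errors = []
--     dupes = sorted(n for n, c in counts.items() if c > 1)
--     if dupes:
--         errors.append(f"source/manifest.json: duplicate agent names: {', '.join(dupes)}")
--     if "consilium-speculator-primus" not in counts:
--         errors.append("source/manifest.json: missing consilium-speculator-primus")
--     return errors
-- ===== Notes on version B (the rewrite author's own statement) =====
-- stated objective: alternative
-- what changed: B builds one frequency table over the agents in a single pass and derives both checks from it (duplicates = keys with count > 1, missing entry = key absent), replacing A's names list, len(set) guard and separate seen-set duplicate scan.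
import Mathlib
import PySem

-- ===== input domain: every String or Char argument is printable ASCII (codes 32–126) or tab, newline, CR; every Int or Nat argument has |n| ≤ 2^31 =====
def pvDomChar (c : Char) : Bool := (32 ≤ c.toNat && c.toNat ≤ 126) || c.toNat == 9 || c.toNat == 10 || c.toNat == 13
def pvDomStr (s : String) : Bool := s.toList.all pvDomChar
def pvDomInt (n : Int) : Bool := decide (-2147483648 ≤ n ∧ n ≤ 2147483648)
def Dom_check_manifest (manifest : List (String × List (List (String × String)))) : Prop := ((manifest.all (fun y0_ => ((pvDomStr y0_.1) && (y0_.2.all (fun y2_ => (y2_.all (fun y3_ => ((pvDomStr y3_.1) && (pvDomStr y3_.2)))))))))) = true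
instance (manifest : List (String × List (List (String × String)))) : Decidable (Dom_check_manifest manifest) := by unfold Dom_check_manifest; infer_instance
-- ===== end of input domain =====

-- B replaces A's names list + len(set) guard + seen-set scan by one frequency
-- table built in a single pass over the agents; same return value, proved below.

-- Python dict lookup on the assoc-list convention: first binding wins (exact:
-- a real Python dict has unique keys, so the first match is the binding).
def pvLookupD {ν : Type} (d : List (String × ν)) (k : String) (dflt : ν) : ν :=
  ((d.find? (fun p => p.1 == k)).map (·.2)).getD dflt

-- ===== PORT A =====
def check_manifest (manifest : List (String × List (List (String × String)))) : List String :=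
  let agents := pvLookupD manifest "agents" []
  let names := agents.map (fun ag => pvLookupD ag "name" "")
  let errors : List String := []
  let errors :=
    if names.length ≠ (PySem.Set.ofList names).length then
      -- the seen-set comprehension: fold carrying (seen, dupes)
      let p := names.foldl
        (fun (p : PySem.Set String × PySem.Set String) n =>
          if PySem.Set.contains p.1 n then (p.1, PySem.Set.add p.2 n)
          else (PySem.Set.add p.1 n, p.2))
        (PySem.Set.empty, PySem.Set.empty)
      let dupes := PySem.List.sorted p.2 (fun x => x) false
      errors ++ ["source/manifest.json: duplicate agent names: " ++ PySem.Str.join ", " dupes]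
    else errors
  if !names.contains "consilium-speculator-primus" then
    errors ++ ["source/manifest.json: missing consilium-speculator-primus"]
  else errors

-- ===== PORT B =====
def check_manifest_alt (manifest : List (String × List (List (String × String)))) : List String :=
  let agents := pvLookupD manifest "agents" []
  let counts := agents.foldl
    (fun (d : PySem.Dict String Int) ag =>
      let name := pvLookupD ag "name" ""
      d.insert name (d.getD name 0 + 1))
    PySem.Dict.empty
  let errors : List String := []
  let dupes := PySem.List.sorted ((counts.items.filter (fun p => p.2 > 1)).map (·.1)) (fun x => x) false
  let errors :=
    if dupes ≠ [] then
      errors ++ ["source/manifest.json: duplicate agent names: " ++ PySem.Str.join ", " dupes]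
    else errors
  if !counts.contains "consilium-speculator-primus" then
    errors ++ ["source/manifest.json: missing consilium-speculator-primus"]
  else errors

-- ===== PRECONDITION & SPEC =====
-- Pre_ excludes exactly the inputs where Python A raises KeyError: a manifest
-- without an "agents" key, or an agent dict without a "name" key.
def Pre_check_manifest (manifest : List (String × List (List (String × String)))) : Prop :=
  (manifest.map (·.1)).contains "agents" = true ∧
  ∀ ag ∈ pvLookupD manifest "agents" ([] : List (List (String × String))),
    (ag.map (·.1)).contains "name" = true
instance (manifest : List (String × List (List (String × String)))) : Decidable (Pre_check_manifest manifest) := by unfold Pre_check_manifest; infer_instance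

def pvWitness_check_manifest : (List (String × List (List (String × String)))) :=
  [("agents", [[("name", "consilium-speculator-primus")], [("name", "a")], [("name", "a")]])]

def Spec_check_manifest (manifest : List (String × List (List (String × String)))) (out : List String) : Prop := out = check_manifest_alt manifest
instance (manifest : List (String × List (List (String × String)))) (out : List String) : Decidable (Spec_check_manifest manifest out) := by unfold Spec_check_manifest; infer_instance

-- ===== CLAIM (what is proved, stated in full; the proofs are below) =====
def Claim_equal_check_manifest : Prop := ∀ (manifest : List (String × List (List (String × String)))), Dom_check_manifest manifest → Pre_check_manifest manifest → Spec_check_manifest manifest (check_manifest manifest)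

-- ===== LEMMAS AND PROOFS =====

-- The seen/dupes fold of A: an element is in the dupes set iff it was already
-- in the dupes set, or it is in the seen set and occurs in the list, or it
-- occurs at least twice in the list.
theorem dupfold_mem (l : List String) (s d : PySem.Set String) (x : String) :
    x ∈ (l.foldl
      (fun (p : PySem.Set String × PySem.Set String) n =>
        if PySem.Set.contains p.1 n then (p.1, PySem.Set.add p.2 n)
        else (PySem.Set.add p.1 n, p.2)) (s, d)).2 ↔
      x ∈ d ∨ (x ∈ s ∧ x ∈ l) ∨ 2 ≤ l.count x := by
  induction l generalizing s d with
  | nil => simp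
  | cons n t ih =>
    simp only [List.foldl_cons]
    rcases eq_or_ne n x with rfl | hne
    · by_cases hns : n ∈ s
      · rw [if_pos ((PySem.Set.contains_iff s n).2 hns)]
        exact iff_of_true
          ((ih s (d.add n)).2 (Or.inl ((PySem.Set.mem_add d n n).2 (Or.inr rfl))))
          (Or.inr (Or.inl ⟨hns, List.mem_cons_self⟩))
      · rw [if_neg (fun h => hns ((PySem.Set.contains_iff s n).1 h))]
        rw [ih]
        have hc : 1 ≤ t.count n ↔ n ∈ t := List.one_le_count_iff
        simp only [PySem.Set.mem_add, List.mem_cons, List.count_cons, beq_self_eq_true, if_true]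
        constructor
        · rintro (h | ⟨hadd, ht⟩ | h)
          · exact Or.inl h
          · have : 1 ≤ t.count n := hc.2 ht
            right; right; omega
          · right; right; omega
        · rintro (h | ⟨hs, _⟩ | h)
          · exact Or.inl h
          · exact absurd hs hns
          · have h1 : 1 ≤ t.count n := by omega
            by_cases h2 : 2 ≤ t.count n
            · right; right; exact h2
            · right; left
              exact ⟨by simp, hc.1 h1⟩
    · have hne' : x ≠ n := hne.symm
      by_cases hns : n ∈ s
      · rw [if_pos ((PySem.Set.contains_iff s n).2 hns)]
        rw [ih]
        simp [PySem.Set.mem_add, hne, hne']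
      · rw [if_neg (fun h => hns ((PySem.Set.contains_iff s n).1 h))]
        rw [ih]
        simp [PySem.Set.mem_add, hne, hne']

theorem dupfold_nodup (l : List String) (s d : PySem.Set String) (hd : d.Nodup) :
    (l.foldl
      (fun (p : PySem.Set String × PySem.Set String) n =>
        if PySem.Set.contains p.1 n then (p.1, PySem.Set.add p.2 n)
        else (PySem.Set.add p.1 n, p.2)) (s, d)).2.Nodup := by
  induction l generalizing s d with
  | nil => exact hd
  | cons n t ih =>
    simp only [List.foldl_cons]
    by_cases hns : PySem.Set.contains s n = true
    · rw [if_pos hns]; exact ih _ _ (PySem.Set.nodup_add d n hd)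
    · rw [if_neg hns]; exact ih _ _ hd

-- len(set(l)) = len(l) iff l has no duplicates
theorem ofList_length_eq_iff_nodup (l : List String) :
    (PySem.Set.ofList l).length = l.length ↔ l.Nodup := by
  constructor
  · intro h
    induction l with
    | nil => simp
    | cons x t ih =>
      rw [PySem.Set.ofList_cons, PySem.Set.discard.eq_1] at h
      simp only [List.length_cons] at h
      have hle : (List.filter (fun y => !y == x) (PySem.Set.ofList t)).length ≤ (PySem.Set.ofList t).length :=
        List.length_filter_le _ _
      have hle2 := PySem.Set.length_ofList_le t
      have heq : (List.filter (fun y => !y == x) (PySem.Set.ofList t)).length = t.length := by omega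
      have hofl : (PySem.Set.ofList t).length = t.length := by omega
      have hnd := ih hofl
      have hxt : x ∉ t := by
        intro hx
        have hxo : x ∈ PySem.Set.ofList t := (PySem.Set.mem_ofList t x).2 hx
        have : (List.filter (fun y => !y == x) (PySem.Set.ofList t)).length < (PySem.Set.ofList t).length := by
          apply List.length_filter_lt_length_iff_exists.2
          exact ⟨x, hxo, by simp⟩
        omega
      exact List.nodup_cons.2 ⟨hxt, hnd⟩
  · intro h
    rw [PySem.Set.ofList_eq_self_of_nodup l h]

-- A's sorted dupes list equals B's sorted filtered-keys list.
theorem dupes_eq (names : List String) :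
    PySem.List.sorted
      ((names.foldl
        (fun (p : PySem.Set String × PySem.Set String) n =>
          if PySem.Set.contains p.1 n then (p.1, PySem.Set.add p.2 n)
          else (PySem.Set.add p.1 n, p.2)) (PySem.Set.empty, PySem.Set.empty)).2)
      (fun x => x) false =
    PySem.List.sorted
      ((((PySem.Dict.counter names).items.filter (fun p => p.2 > 1)).map (·.1)))
      (fun x => x) false := by
  apply PySem.List.sorted_eq_sorted_of_perm _ _ _ (fun _ _ h => h)
  rw [PySem.Dict.items_counter, List.filter_map]
  have hnd1 : ((names.foldl
        (fun (p : PySem.Set String × PySem.Set String) n =>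
          if PySem.Set.contains p.1 n then (p.1, PySem.Set.add p.2 n)
          else (PySem.Set.add p.1 n, p.2)) (PySem.Set.empty, PySem.Set.empty)).2).Nodup :=
    dupfold_nodup names _ _ (by simp [PySem.Set.empty])
  have hnd2 : (List.map (fun p => p.1)
      (List.map (fun k => (k, (List.count k names : Int))) ((PySem.Set.ofList names).filter
        (fun k => decide ((1:Int) < (List.count k names : Int)))))).Nodup := by
    rw [List.map_map]
    have : ((fun (p : String × Int) => p.1) ∘ fun k => (k, (List.count k names : Int))) = id := rfl
    rw [this, List.map_id]
    exact (PySem.Set.nodup_ofList names).filter _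
  have hfc : (fun (p : String × Int) => decide (p.2 > 1)) ∘ (fun k => (k, (List.count k names : Int)))
      = fun k => decide ((1:Int) < (List.count k names : Int)) := rfl
  rw [hfc]
  apply (List.perm_ext_iff_of_nodup hnd1 hnd2).2
  intro a
  rw [dupfold_mem]
  simp only [List.map_map, List.mem_map, Function.comp_apply]
  constructor
  · rintro (h | h | h)
    · simp [PySem.Set.empty] at h
    · simp [PySem.Set.empty] at h
    · refine ⟨a, ?_, rfl⟩
      rw [List.mem_filter]
      refine ⟨(PySem.Set.mem_ofList names a).2 (List.one_le_count_iff.1 (by omega)), by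
        simp only [decide_eq_true_eq]
        exact_mod_cast (by omega : (1:Nat) < names.count a)⟩
  · rintro ⟨k, hk, rfl⟩
    rw [List.mem_filter] at hk
    right; right
    have : (1:Int) < (List.count k names : Int) := by simpa using hk.2
    exact_mod_cast (by exact_mod_cast this : (1:Nat) < names.count k)

-- B's dupes list is empty iff names has no duplicates.
theorem dupesB_nil_iff (names : List String) :
    PySem.List.sorted
      ((((PySem.Dict.counter names).items.filter (fun p => p.2 > 1)).map (·.1)))
      (fun x => x) false = [] ↔ names.Nodup := by
  rw [PySem.List.sorted_eq_nil_iff, List.map_eq_nil_iff, List.filter_eq_nil_iff]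
  rw [PySem.Dict.items_counter]
  constructor
  · intro h
    rw [List.nodup_iff_count_le_one]
    intro a
    by_contra hgt
    rw [not_le] at hgt
    have ha : a ∈ PySem.Set.ofList names :=
      (PySem.Set.mem_ofList names a).2 (List.one_le_count_iff.1 (by omega))
    have := h (a, (List.count a names : Int)) (List.mem_map.2 ⟨a, ha, rfl⟩)
    simp only [decide_eq_true_eq, not_lt] at this
    have : (List.count a names : Int) ≤ 1 := by simpa using this
    omega
  · intro h p hp
    rcases List.mem_map.1 hp with ⟨k, _, rfl⟩
    have := List.nodup_iff_count_le_one.1 h k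
    simp only [gt_iff_lt, decide_eq_true_eq, not_lt]
    exact_mod_cast this

-- ===== VERDICT (by name: the statement is the Claim_ definition above) =====
theorem check_manifest_spec : Claim_equal_check_manifest := by
  intro manifest _ _
  unfold Spec_check_manifest check_manifest check_manifest_alt
  simp only []
  set agents := pvLookupD manifest "agents" ([] : List (List (String × String))) with hag
  set names := agents.map (fun ag => pvLookupD ag "name" "") with hn
  -- B's counts is the counter of names
  have hcounts : agents.foldl
      (fun (d : PySem.Dict String Int) ag =>
        d.insert (pvLookupD ag "name" "") (d.getD (pvLookupD ag "name" "") 0 + 1))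
      PySem.Dict.empty = PySem.Dict.counter names := by
    have h := PySem.Dict.foldl_insert_getD_add_one_eq_counter
      (List.map (fun ag => pvLookupD ag "name" "") agents)
    rw [List.foldl_map] at h
    exact h
  rw [hcounts, ← dupes_eq names, PySem.Dict.contains_counter]
  have hguard : (names.length ≠ (PySem.Set.ofList names).length) ↔
      (PySem.List.sorted
        ((names.foldl
          (fun (p : PySem.Set String × PySem.Set String) n =>
            if PySem.Set.contains p.1 n then (p.1, PySem.Set.add p.2 n)
            else (PySem.Set.add p.1 n, p.2)) (PySem.Set.empty, PySem.Set.empty)).2)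
        (fun x => x) false ≠ []) := by
    rw [ne_eq, ne_eq, dupes_eq names, dupesB_nil_iff, ← ofList_length_eq_iff_nodup]
    omega
  by_cases hdup : names.length ≠ (PySem.Set.ofList names).length
  · rw [if_pos hdup, if_pos (hguard.1 hdup)]
  · rw [if_neg hdup, if_neg (fun h => hdup (hguard.2 h))]
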